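-- pv_equiv track=rewrite | github.com/Suanec/slcs | slcs/src/python/suanec/slcs/backtracking/36_valid_sudoku.py | isValidMatrix
-- ===== SOURCE A (Python) =====
-- def isValidMatrix(matrix):
--     inner_set = set()
--     for row in matrix:
--         for elem in row:
--             if("." != elem):
--                 if(elem in inner_set):
--                     return False
--             inner_set.add(elem)
--     return True
-- ===== SOURCE B (Python) =====
-- def isValidMatrix(matrix):
--     cells = sorted(e for row in matrix for e in row if e != ".")
--     return all(a != b for a, b in zip(cells, cells[1:]))
-- ===== Notes on version B (the rewrite author's own statement) =====
-- stated objective: alternative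
-- what changed: B sorts the flattened non-dot cells and checks that no two adjacent elements of the sorted list are equal (sort-based duplicate detection), instead of A's nested pass over a seen-set with early return.
import Mathlib
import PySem

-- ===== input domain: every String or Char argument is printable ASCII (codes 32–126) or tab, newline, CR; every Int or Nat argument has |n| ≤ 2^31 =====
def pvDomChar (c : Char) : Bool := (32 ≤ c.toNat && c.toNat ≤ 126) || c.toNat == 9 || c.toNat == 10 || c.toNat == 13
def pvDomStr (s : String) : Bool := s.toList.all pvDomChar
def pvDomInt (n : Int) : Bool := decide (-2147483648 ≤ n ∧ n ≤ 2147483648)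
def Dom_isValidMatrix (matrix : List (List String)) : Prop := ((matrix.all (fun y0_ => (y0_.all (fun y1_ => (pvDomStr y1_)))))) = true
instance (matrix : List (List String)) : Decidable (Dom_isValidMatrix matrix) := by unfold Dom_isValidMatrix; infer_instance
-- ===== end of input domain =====

-- B detects duplicates by sorting the flattened non-dot cells and comparing adjacent
-- elements, instead of A's nested seen-set pass with early return; alternative algorithm.

-- ===== PORT A =====
-- inner loop of A: walk one row, early-exit (none) on a repeated non-"." element,
-- otherwise return the updated seen-set
def pvInnerA : PySem.Set String → List String → Option (PySem.Set String)
  | s, [] => some s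
  | s, e :: rest =>
      if e != "." && s.contains e then none else pvInnerA (s.add e) rest

-- outer loop of A over the rows
def pvOuterA : PySem.Set String → List (List String) → Bool
  | _, [] => true
  | s, r :: rs =>
      match pvInnerA s r with
      | none => false
      | some s' => pvOuterA s' rs

def isValidMatrix (matrix : List (List String)) : Bool :=
  pvOuterA PySem.Set.empty matrix

-- ===== PORT B =====
def isValidMatrix_alt (matrix : List (List String)) : Bool :=
  let cells :=
    PySem.List.sorted (matrix.flatMap (fun row => row.filter (fun e => e != ".")))
      (fun x => x) false
  (cells.zip (PySem.List.slice cells (some 1) none)).all (fun p => p.1 != p.2)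

-- ===== PRECONDITION & SPEC =====
def Spec_isValidMatrix (matrix : List (List String)) (out : Bool) : Prop := out = isValidMatrix_alt matrix
instance (matrix : List (List String)) (out : Bool) : Decidable (Spec_isValidMatrix matrix out) := by unfold Spec_isValidMatrix; infer_instance

-- ===== CLAIM (what is proved, stated in full; the proofs are below) =====
def Claim_equal_isValidMatrix : Prop := ∀ (matrix : List (List String)), Dom_isValidMatrix matrix → Spec_isValidMatrix matrix (isValidMatrix matrix)

-- ===== LEMMAS AND PROOFS =====

theorem pvInnerA_append (a b : List String) (s : PySem.Set String) :
    pvInnerA s (a ++ b) = (pvInnerA s a).bind (fun s' => pvInnerA s' b) := by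
  induction a generalizing s with
  | nil => rfl
  | cons e rest ih =>
      simp only [List.cons_append, pvInnerA]
      split
      · rfl
      · exact ih _

theorem pvOuterA_eq (rows : List (List String)) (s : PySem.Set String) :
    pvOuterA s rows = (pvInnerA s (rows.flatMap id)).isSome := by
  induction rows generalizing s with
  | nil => rfl
  | cons r rs ih =>
      simp only [pvOuterA, List.flatMap_cons, id, pvInnerA_append]
      cases h : pvInnerA s r with
      | none => rfl
      | some s' => simpa using ih s'

theorem pvInnerA_isSome (l : List String) (s : PySem.Set String) :
    (pvInnerA s l).isSome = true ↔
      ((l.filter (fun e => e != ".")).Nodup ∧ ∀ x ∈ l, x ≠ "." → x ∉ s) := by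
  induction l generalizing s with
  | nil => simp [pvInnerA]
  | cons e rest ih =>
      by_cases he : e = "."
      · subst he
        have h0 : pvInnerA s ("." :: rest) = pvInnerA (s.add ".") rest := by
          simp [pvInnerA]
        have hf : List.filter (fun e => e != ".") ("." :: rest) =
            List.filter (fun e => e != ".") rest := by simp
        rw [h0, ih, hf]
        simp only [List.mem_cons]
        constructor
        · rintro ⟨h1, h2⟩
          refine ⟨h1, ?_⟩
          rintro x (rfl | hx) hxd
          · exact absurd rfl hxd
          · exact fun hm => h2 x hx hxd ((PySem.Set.mem_add s "." x).2 (Or.inl hm))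
        · rintro ⟨h1, h2⟩
          refine ⟨h1, ?_⟩
          intro x hx hxd hm
          rcases (PySem.Set.mem_add s "." x).1 hm with hm | hm
          · exact h2 x (Or.inr hx) hxd hm
          · exact hxd hm
      · by_cases hc : e ∈ s
        · have hcond : (e != "." && s.contains e) = true := by
            simp [bne, he, PySem.Set.contains, hc]
          have h0 : pvInnerA s (e :: rest) = none := by
            simp only [pvInnerA, hcond]
            simp
          rw [h0]
          simp only [Option.isSome_none, Bool.false_eq_true, false_iff]
          rintro ⟨-, h2⟩
          exact h2 e List.mem_cons_self he hc
        · have hcond : (e != "." && s.contains e) = false := by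
            simp [PySem.Set.contains, hc]
          have h0 : pvInnerA s (e :: rest) = pvInnerA (s.add e) rest := by
            simp only [pvInnerA, hcond]
            simp
          have hf : List.filter (fun e => e != ".") (e :: rest) =
              e :: List.filter (fun e => e != ".") rest := by
            simp [bne, he]
          rw [h0, ih, hf]
          simp only [List.nodup_cons, List.mem_filter, List.mem_cons, bne_iff_ne, ne_eq]
          constructor
          · rintro ⟨h1, h2⟩
            have hrest : ∀ x ∈ rest, x ≠ "." → x ∉ s ∧ x ≠ e := by
              intro x hx hxd
              have hmm := h2 x hx hxd
              simp only [PySem.Set.mem_add] at hmm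
              push Not at hmm
              exact hmm
            refine ⟨⟨fun hm => (hrest e hm.1 hm.2).2 rfl, h1⟩, ?_⟩
            rintro x (rfl | hx) hxd
            · exact hc
            · exact (hrest x hx hxd).1
          · rintro ⟨⟨hen, h1⟩, h2⟩
            refine ⟨h1, ?_⟩
            intro x hx hxd
            simp only [PySem.Set.mem_add]
            push Not
            refine ⟨h2 x (Or.inr hx) hxd, ?_⟩
            intro hxe
            exact hen ⟨hxe ▸ hx, hxe ▸ hxd⟩

theorem pvA_char (matrix : List (List String)) :
    isValidMatrix matrix =
      decide ((matrix.flatMap id).filter (fun e => e != ".")).Nodup := by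
  rw [isValidMatrix, pvOuterA_eq]
  rcases Bool.dichotomy (decide ((matrix.flatMap id).filter (fun e => e != ".")).Nodup)
    with h | h <;> rw [h]
  · rw [Bool.eq_false_iff, Ne, pvInnerA_isSome]
    simp only [decide_eq_false_iff_not] at h
    tauto
  · rw [pvInnerA_isSome]
    simp only [decide_eq_true_eq] at h
    exact ⟨h, fun x _ _ hx => by simp [PySem.Set.empty] at hx⟩

-- on a (≤)-sorted list, "no two adjacent elements equal" is exactly Nodup
theorem pv_adj_nodup (l : List String) (h : l.Pairwise (· ≤ ·)) :
    ((l.zip (l.drop 1)).all (fun p => p.1 != p.2)) = decide l.Nodup := by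
  induction l with
  | nil => rfl
  | cons a t ih =>
      cases t with
      | nil => simp
      | cons b t' =>
          have hab : a ≤ b := (List.pairwise_cons.mp h).1 b List.mem_cons_self
          have hp' : (b :: t').Pairwise (· ≤ ·) := (List.pairwise_cons.mp h).2
          have hble : ∀ x ∈ t', b ≤ x := (List.pairwise_cons.mp hp').1
          simp only [List.drop_succ_cons, List.drop_zero, List.zip_cons_cons,
            List.all_cons]
          by_cases heq : a = b
          · subst heq
            have : (a :: a :: t').Nodup = False := by
              simp [List.nodup_cons]
            simp [this]
          · have hlt : a < b := lt_of_le_of_ne hab heq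
            have hnm : a ∉ b :: t' := by
              intro hm
              rcases List.mem_cons.mp hm with rfl | hm
              · exact heq rfl
              · exact absurd rfl (ne_of_lt (lt_of_lt_of_le hlt (hble a hm)))
            have hbne : (a != b) = true := by simp [bne, heq]
            have ihh := ih hp'
            simp only [List.drop_succ_cons, List.drop_zero] at ihh
            rw [hbne, Bool.true_and, ihh]
            have : (a :: b :: t').Nodup ↔ (b :: t').Nodup := by
              simp [List.nodup_cons, hnm]
            simp [this]

theorem pvB_char (matrix : List (List String)) :
    isValidMatrix_alt matrix =
      decide ((matrix.flatMap id).filter (fun e => e != ".")).Nodup := by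
  rw [isValidMatrix_alt]
  have hflat : matrix.flatMap (fun row => row.filter (fun e => e != ".")) =
      (matrix.flatMap id).filter (fun e => e != ".") := by
    induction matrix with
    | nil => rfl
    | cons r rs ih => simp [List.flatMap_cons, List.filter_append, ih]
  set fl := (matrix.flatMap id).filter (fun e => e != ".") with hfl
  simp only [hflat]
  set cells := PySem.List.sorted fl (fun x => x) false with hc
  rw [PySem.List.slice_from_one,
      show cells.tail = cells.drop 1 from List.drop_one.symm,
      pv_adj_nodup cells (PySem.List.sorted_pairwise fl (fun x => x)),
      decide_eq_decide]
  exact (PySem.List.sorted_perm fl (fun x => x) false).nodup_iff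

-- ===== VERDICT (by name: the statement is the Claim_ definition above) =====
theorem isValidMatrix_spec : Claim_equal_isValidMatrix := by
  intro matrix _
  unfold Spec_isValidMatrix
  rw [pvA_char, pvB_char]
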